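-- pv_equiv track=rewrite | github.com/alprisol/GiRbot-Moveo | moveo_software/AuxiliarFunctions.py | unflatten_list
-- ===== SOURCE A (Python) =====
-- def unflatten_list(flat_list, final_list_structure):
--     """
--     Reshapes a flat list into a nested list structure based on a specified structure.
--
--     This function takes a flat list and reshapes it into a nested list, where each
--     sublist's length is defined by the corresponding element in `final_list_structure`.
--     The sum of the elements in `final_list_structure` should match the length of the `flat_list`.
--
--     Parameters:
--     flat_list (list): The flat list that needs to be reshaped.
--     final_list_structure (list of ints): A list of integers where each integer defines the
--                                          length of the corresponding sublist in the resulting list.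
--
--     Returns:
--     list: A reshaped list of lists, where each sublist has the specified length.
--
--     Raises:
--     ValueError: If the total size of the `final_list_structure` doesn't match the size of `flat_list`.
--
--     Example:
--     >>> flat_list = [1, 2, 3, 4, 5, 6]
--     >>> final_list_structure = [2, 2, 2]
--     >>> unflatten_list(flat_list, final_list_structure)
--     [[1, 2], [3, 4], [5, 6]]
--
--     >>> flat_list = [1, 2, 3, 4, 5]
--     >>> final_list_structure = [2, 3]
--     >>> unflatten_list(flat_list, final_list_structure)
--     [[1, 2], [3, 4, 5]]
--     """
--     # Check if the total size of final_list_structure matches the length of flat_list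
--     if sum(final_list_structure) != len(flat_list):
--         raise ValueError(
--             "The total size of final_list_structure must match the size of flat_list."
--         )
--
--     result = []  # Initialize the result list
--     start = 0  # Track the starting index of each sublist
--
--     # Reshape the flat list based on the lengths in final_list_structure
--     for length in final_list_structure:
--         end = start + length  # Determine the end index for the sublist
--         result.append(flat_list[start:end])  # Append the sublist
--         start = end  # Update the start index for the next iteration
--
--     return result
-- ===== SOURCE B (Python) =====
-- def unflatten_list(flat_list, final_list_structure):
--     if sum(final_list_structure) != len(flat_list):
--         raise ValueError(
--             "The total size of final_list_structure must match the size of flat_list."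
--         )
--     # Recursive consumption: peel off the first sublist and recurse on the
--     # remaining flat elements and the remaining structure.
--     if not final_list_structure:
--         return []
--     n = final_list_structure[0]
--     return [flat_list[:n]] + unflatten_list(flat_list[n:], final_list_structure[1:])
-- ===== Notes on version B (the rewrite author's own statement) =====
-- stated objective: alternative
-- what changed: B replaces A's single loop with a mutable running start index over the original list by a recursive decomposition that peels off the first sublist (flat_list[:n]) and recurses on the remaining elements (flat_list[n:]) and the remaining structure.
-- outside the precondition, e.g. on unflatten_list([1, 2], [-1, 3]): A returns [[1], [2]], B raises ValueError
import Mathlib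
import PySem

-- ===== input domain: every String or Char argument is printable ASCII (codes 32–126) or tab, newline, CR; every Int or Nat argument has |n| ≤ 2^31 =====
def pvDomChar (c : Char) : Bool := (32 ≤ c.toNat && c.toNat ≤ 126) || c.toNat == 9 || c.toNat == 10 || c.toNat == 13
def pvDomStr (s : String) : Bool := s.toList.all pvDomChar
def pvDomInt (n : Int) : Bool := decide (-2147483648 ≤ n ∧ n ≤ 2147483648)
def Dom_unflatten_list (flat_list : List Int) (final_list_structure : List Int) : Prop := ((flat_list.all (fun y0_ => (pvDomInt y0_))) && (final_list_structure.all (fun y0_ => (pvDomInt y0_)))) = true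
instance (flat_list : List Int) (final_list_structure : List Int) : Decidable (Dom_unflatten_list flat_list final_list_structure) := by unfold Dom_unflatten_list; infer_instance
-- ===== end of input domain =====

-- B replaces A's mutable running-start loop by a recursion that peels off the first
-- sublist and recurses on the remaining elements (alternative decomposition; same result).
-- Pre_ excludes the sum-mismatch inputs (A raises ValueError) and, stated below, negative lengths.


-- ===== PORT A =====
-- A: loop over lengths with mutable (result, start); result.append(flat_list[start:end]); start = end
def unflatten_list (flat_list : List Int) (final_list_structure : List Int) : List (List Int) :=
  (final_list_structure.foldl
    (fun (st : List (List Int) × Int) length =>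
      let «end» := st.2 + length
      (st.1 ++ [PySem.List.slice flat_list st.2 «end»], «end»))
    ([], 0)).1

-- ===== PORT B =====
-- B: peel off flat_list[:n], recurse on flat_list[n:] and the remaining structure
def unflatten_list_alt (flat_list : List Int) (final_list_structure : List Int) : List (List Int) :=
  match final_list_structure with
  | [] => []
  | n :: rest =>
      PySem.List.slice flat_list none (some n)
        :: unflatten_list_alt (PySem.List.slice flat_list (some n) none) rest

-- ===== PRECONDITION & SPEC =====
-- Pre_ excludes (a) sum(final_list_structure) != len(flat_list), where A raises ValueError
-- (B raises the same at top level), and (b) structures containing a negative length, where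
-- A's returned sublists are an artefact of Python's negative-index slice wraparound and B's
-- recursive consumption itself raises ValueError at a deeper level (see claim cites).
def Pre_unflatten_list (flat_list : List Int) (final_list_structure : List Int) : Prop :=
  final_list_structure.sum = (flat_list.length : Int) ∧ ∀ x ∈ final_list_structure, 0 ≤ x
instance (flat_list : List Int) (final_list_structure : List Int) : Decidable (Pre_unflatten_list flat_list final_list_structure) := by unfold Pre_unflatten_list; infer_instance
def pvWitness_unflatten_list : List Int × List Int := ([1, 2, 3, 4, 5], [2, 3])

def Spec_unflatten_list (flat_list : List Int) (final_list_structure : List Int) (out : List (List Int)) : Prop := out = unflatten_list_alt flat_list final_list_structure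
instance (flat_list : List Int) (final_list_structure : List Int) (out : List (List Int)) : Decidable (Spec_unflatten_list flat_list final_list_structure out) := by unfold Spec_unflatten_list; infer_instance

-- ===== CLAIM (what is proved, stated in full; the proofs are below) =====
def Claim_equal_unflatten_list : Prop := ∀ (flat_list : List Int) (final_list_structure : List Int), Dom_unflatten_list flat_list final_list_structure → Pre_unflatten_list flat_list final_list_structure → Spec_unflatten_list flat_list final_list_structure (unflatten_list flat_list final_list_structure)

-- ===== LEMMAS AND PROOFS =====

-- reference form of A's loop: sublists of the ORIGINAL list with running start s
def pvGo (fl : List Int) (fls : List Int) (s : Int) : List (List Int) :=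
  match fls with
  | [] => []
  | l :: ls => PySem.List.slice fl (some s) (some (s + l)) :: pvGo fl ls (s + l)

theorem pvA_fold (fl : List Int) (fls : List Int) (acc : List (List Int)) (s : Int) :
    (fls.foldl
      (fun (st : List (List Int) × Int) length =>
        (st.1 ++ [PySem.List.slice fl (some st.2) (some (st.2 + length))], st.2 + length))
      (acc, s)).1 = acc ++ pvGo fl fls s := by
  induction fls generalizing acc s with
  | nil => simp [pvGo]
  | cons l ls ih => simp only [List.foldl, pvGo, ih, List.append_assoc]; simp

-- with nonnegative lengths, A's slices of the original list at start k agree with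
-- B's recursion on the k-dropped list
theorem pvGo_eq_alt (fl : List Int) (fls : List Int) (k : ℕ)
    (h : ∀ x ∈ fls, 0 ≤ x) :
    pvGo fl fls (k : Int) = unflatten_list_alt (fl.drop k) fls := by
  induction fls generalizing k with
  | nil => simp [pvGo, unflatten_list_alt]
  | cons n rest ih =>
    have hn : 0 ≤ n := h n (by simp)
    obtain ⟨m, rfl⟩ : ∃ m : ℕ, n = (m : Int) := ⟨n.toNat, (Int.toNat_of_nonneg hn).symm⟩
    have hk : ((k : Int) + (m : Int)) = (((k + m : ℕ)) : Int) := by push_cast; ring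
    simp only [pvGo, unflatten_list_alt]
    refine List.cons_eq_cons.mpr ⟨?_, ?_⟩
    · rw [PySem.List.slice_natCast_add, PySem.List.slice_to_natCast]
    · rw [hk, ih (k + m) (fun x hx => h x (by simp [hx])),
          PySem.List.slice_from_natCast]
      rw [List.drop_drop]

-- ===== VERDICT (by name: the statement is the Claim_ definition above) =====
theorem unflatten_list_spec : Claim_equal_unflatten_list := by
  intro fl fls _ hpre
  unfold Spec_unflatten_list unflatten_list
  have hA := pvA_fold fl fls [] 0
  simp only [List.nil_append] at hA
  rw [hA]
  have := pvGo_eq_alt fl fls 0 hpre.2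
  simpa using this
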